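-- pv_equiv track=rewrite | github.com/chb2ab/DjangoWebpage | hw2_p1.py | notcommon_items
-- ===== SOURCE A (Python) =====
-- def notcommon_items(list1, list2):
--     """returns the items not in common between list1 and list2 as a list"""
--     notCommonItems = []
--     for x in list1:
--         if not(x in list2):
--             if not(x in notCommonItems):
--                 notCommonItems.append(x)
--     for y in list2:
--         if not(y in list1):
--             if not(y in notCommonItems):
--                 notCommonItems.append(y)
--     return notCommonItems
-- ===== SOURCE B (Python) =====
-- def notcommon_items(list1, list2):
--     """returns the items not in common between list1 and list2 as a list"""
--     tag = {}  # element -> bitmask: bit 1 = occurs in list1, bit 2 = occurs in list2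
--     for x in list1:
--         tag[x] = 1
--     for y in list2:
--         tag[y] = tag.get(y, 0) | 2
--     return [k for k, v in tag.items() if v != 3]
-- ===== Notes on version B (the rewrite author's own statement) =====
-- stated objective: faster
-- what changed: Replaces A's append-with-linear-membership-scans construction by a tag dictionary: two marking passes set a bitmask (1=in list1, 2=in list2) per element, and the result is one comprehension over the dict's items keeping tags != 3 (dedup and order come from dict insertion order).
import Mathlib
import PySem

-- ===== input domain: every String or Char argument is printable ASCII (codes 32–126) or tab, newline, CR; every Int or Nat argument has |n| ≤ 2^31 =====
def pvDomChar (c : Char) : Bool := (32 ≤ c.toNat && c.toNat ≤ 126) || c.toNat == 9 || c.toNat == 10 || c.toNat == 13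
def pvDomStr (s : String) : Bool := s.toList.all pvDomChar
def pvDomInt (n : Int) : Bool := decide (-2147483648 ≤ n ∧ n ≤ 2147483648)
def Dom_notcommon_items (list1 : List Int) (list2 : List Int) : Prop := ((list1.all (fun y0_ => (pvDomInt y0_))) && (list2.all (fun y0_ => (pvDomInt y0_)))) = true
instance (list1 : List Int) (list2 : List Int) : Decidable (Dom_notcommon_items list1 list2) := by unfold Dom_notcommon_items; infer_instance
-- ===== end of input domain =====

-- B replaces A's append-with-linear-membership-scans construction by a tag dictionary:
-- two marking passes set a bitmask (1 = in list1, 2 = in list2) per element, then one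
-- comprehension over the dict's items keeps the tags ≠ 3 (objective: faster).

-- ===== PORT A =====
def notcommon_items (list1 : List Int) (list2 : List Int) : List Int :=
  let acc1 := list1.foldl (fun acc x =>
    if ¬ (list2.contains x) then
      (if ¬ (acc.contains x) then acc ++ [x] else acc)
    else acc) []
  list2.foldl (fun acc y =>
    if ¬ (list1.contains y) then
      (if ¬ (acc.contains y) then acc ++ [y] else acc)
    else acc) acc1

-- ===== PORT B =====
def notcommon_items_alt (list1 : List Int) (list2 : List Int) : List Int :=
  let tag1 := list1.foldl (fun (d : PySem.Dict Int Int) x => d.insert x 1) PySem.Dict.empty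
  let tag := list2.foldl (fun (d : PySem.Dict Int Int) y => d.insert y (PySem.Int.bor (d.getD y 0) 2)) tag1
  (tag.items.filter (fun kv => kv.2 != 3)).map (fun kv => kv.1)

-- ===== PRECONDITION & SPEC =====
def Spec_notcommon_items (list1 : List Int) (list2 : List Int) (out : List Int) : Prop := out = notcommon_items_alt list1 list2
instance (list1 : List Int) (list2 : List Int) (out : List Int) : Decidable (Spec_notcommon_items list1 list2 out) := by unfold Spec_notcommon_items; infer_instance

-- ===== CLAIM (what is proved, stated in full; the proofs are below) =====
def Claim_equal_notcommon_items : Prop := ∀ (list1 : List Int) (list2 : List Int), Dom_notcommon_items list1 list2 → Spec_notcommon_items list1 list2 (notcommon_items list1 list2)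

-- ===== LEMMAS AND PROOFS =====

-- after the first marking pass, the value at k is 1 iff k occurs in the list
theorem getD_mark_one (l : List Int) (d : PySem.Dict Int Int) (k : Int) :
    (l.foldl (fun d x => d.insert x 1) d).getD k 0 = if k ∈ l then 1 else d.getD k 0 := by
  induction l generalizing d with
  | nil => simp
  | cons x t ih =>
    simp only [List.foldl_cons, ih, PySem.Dict.getD_insert, List.mem_cons]
    by_cases h1 : k ∈ t <;> by_cases h2 : k = x <;> simp [h1, h2]

theorem bor_two_two (v : Int) (hv : v = 0 ∨ v = 1 ∨ v = 2 ∨ v = 3) :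
    PySem.Int.bor (PySem.Int.bor v 2) 2 = PySem.Int.bor v 2 := by
  rcases hv with h | h | h | h <;> subst h <;> decide

theorem bor_two_range (v : Int) (hv : v = 0 ∨ v = 1 ∨ v = 2 ∨ v = 3) :
    PySem.Int.bor v 2 = 2 ∨ PySem.Int.bor v 2 = 3 := by
  rcases hv with h | h | h | h <;> subst h <;> first | exact Or.inl (by decide) | exact Or.inr (by decide)

-- after the second marking pass (values staying in {0,1,2,3}), the value at k gains bit 2 iff k occurs
theorem getD_mark_two (l : List Int) (d : PySem.Dict Int Int)
    (h : ∀ j : Int, d.getD j 0 = 0 ∨ d.getD j 0 = 1 ∨ d.getD j 0 = 2 ∨ d.getD j 0 = 3) (k : Int) :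
    (l.foldl (fun d y => d.insert y (PySem.Int.bor (d.getD y 0) 2)) d).getD k 0
      = if k ∈ l then PySem.Int.bor (d.getD k 0) 2 else d.getD k 0 := by
  induction l generalizing d with
  | nil => simp
  | cons y t ih =>
    have h' : ∀ j : Int, (d.insert y (PySem.Int.bor (d.getD y 0) 2)).getD j 0 = 0 ∨
        (d.insert y (PySem.Int.bor (d.getD y 0) 2)).getD j 0 = 1 ∨
        (d.insert y (PySem.Int.bor (d.getD y 0) 2)).getD j 0 = 2 ∨
        (d.insert y (PySem.Int.bor (d.getD y 0) 2)).getD j 0 = 3 := by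
      intro j
      rw [PySem.Dict.getD_insert]
      by_cases hj : j = y
      · rw [if_pos hj]
        rcases bor_two_range _ (h y) with hv | hv
        · exact Or.inr (Or.inr (Or.inl hv))
        · exact Or.inr (Or.inr (Or.inr hv))
      · rw [if_neg hj]; exact h j
    simp only [List.foldl_cons, ih _ h', PySem.Dict.getD_insert, List.mem_cons]
    by_cases h1 : k ∈ t <;> by_cases h2 : k = y
    · subst h2
      simp only [h1, if_true, or_true]
      exact bor_two_two _ (h k)
    · simp [h1, h2]
    · subst h2; simp [h1]
    · simp [h1, h2]

-- filtering commutes with set-style first-occurrence insertion of one element …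
theorem filter_set_add (p : Int → Bool) (s : List Int) (y : Int) :
    (PySem.Set.add s y).filter p =
      if p y then PySem.Set.add (s.filter p) y else s.filter p := by
  simp only [PySem.Set.add, PySem.Set.contains]
  by_cases hy : p y
  · by_cases hm : y ∈ s
    · have hf : y ∈ s.filter p := List.mem_filter.mpr ⟨hm, hy⟩
      simp [hy, hm, hf]
    · have hf : y ∉ s.filter p := fun hc => hm (List.mem_filter.mp hc).1
      simp [hy, hm, hf, List.filter_append]
  · by_cases hm : y ∈ s <;> simp [hy, hm, List.filter_append]

-- … and hence with a whole set-style update pass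
theorem filter_set_update (p : Int → Bool) (l s : List Int) :
    (PySem.Set.update s l).filter p = PySem.Set.update (s.filter p) (l.filter p) := by
  induction l generalizing s with
  | nil => simp [PySem.Set.update]
  | cons y t ih =>
    show (PySem.Set.update (PySem.Set.add s y) t).filter p = _
    rw [ih, filter_set_add]
    by_cases hy : p y
    · simp only [List.filter_cons, hy, if_pos]
      rfl
    · simp only [List.filter_cons, hy, if_neg, Bool.false_eq_true, not_false_iff]

-- B computes the first-occurrence dedup of list1 then list2, filtered by the final tag value
theorem alt_eq (l1 l2 : List Int) :
    notcommon_items_alt l1 l2 =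
      (PySem.Set.update (PySem.Set.update PySem.Set.empty l1) l2).filter
        (fun k => ((if k ∈ l2 then PySem.Int.bor (if k ∈ l1 then (1:Int) else 0) 2
                    else if k ∈ l1 then (1:Int) else 0) != 3)) := by
  unfold notcommon_items_alt
  dsimp only
  have h1 : ∀ j : Int,
      (l1.foldl (fun (d : PySem.Dict Int Int) x => d.insert x 1) PySem.Dict.empty).getD j 0
        = if j ∈ l1 then 1 else 0 := by
    intro j; rw [getD_mark_one]; simp
  have hrange : ∀ j : Int,
      (l1.foldl (fun (d : PySem.Dict Int Int) x => d.insert x 1) PySem.Dict.empty).getD j 0 = 0 ∨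
      (l1.foldl (fun (d : PySem.Dict Int Int) x => d.insert x 1) PySem.Dict.empty).getD j 0 = 1 ∨
      (l1.foldl (fun (d : PySem.Dict Int Int) x => d.insert x 1) PySem.Dict.empty).getD j 0 = 2 ∨
      (l1.foldl (fun (d : PySem.Dict Int Int) x => d.insert x 1) PySem.Dict.empty).getD j 0 = 3 := by
    intro j; rw [h1]; by_cases hj : j ∈ l1 <;> simp [hj]
  have h2 : ∀ j : Int,
      (l2.foldl (fun (d : PySem.Dict Int Int) y => d.insert y (PySem.Int.bor (d.getD y 0) 2))
        (l1.foldl (fun (d : PySem.Dict Int Int) x => d.insert x 1) PySem.Dict.empty)).getD j 0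
      = if j ∈ l2 then PySem.Int.bor (if j ∈ l1 then (1:Int) else 0) 2
        else if j ∈ l1 then (1:Int) else 0 := by
    intro j; rw [getD_mark_two _ _ hrange, h1]
  have hnd :
      (l2.foldl (fun (d : PySem.Dict Int Int) y => d.insert y (PySem.Int.bor (d.getD y 0) 2))
        (l1.foldl (fun (d : PySem.Dict Int Int) x => d.insert x 1) PySem.Dict.empty)).keys.Nodup := by
    apply PySem.Dict.nodup_keys_foldl_insert
    apply PySem.Dict.nodup_keys_foldl_insert
    exact PySem.Dict.nodup_keys_empty
  have hk :
      (l2.foldl (fun (d : PySem.Dict Int Int) y => d.insert y (PySem.Int.bor (d.getD y 0) 2))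
        (l1.foldl (fun (d : PySem.Dict Int Int) x => d.insert x 1) PySem.Dict.empty)).keys
      = PySem.Set.update (PySem.Set.update PySem.Set.empty l1) l2 := by
    rw [PySem.Dict.keys_foldl_insert, PySem.Dict.keys_foldl_insert, PySem.Dict.keys_empty]
    rfl
  rw [PySem.Dict.items_eq_map_keys _ hnd 0, List.filter_map, List.map_map]
  rw [List.filter_congr (fun k _ => by rw [Function.comp_apply, h2])]
  simp only [Function.comp_def]
  rw [List.map_id', hk]

-- A's dedup-append step is exactly set insertion
theorem add_step (acc : List Int) (x : Int) :
    (if ¬ (acc.contains x) then acc ++ [x] else acc) = PySem.Set.add acc x := by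
  simp only [PySem.Set.add, PySem.Set.contains]
  by_cases h : x ∈ acc <;> simp [h]

theorem notcommon_items_eq_alt (l1 l2 : List Int) :
    notcommon_items l1 l2 = notcommon_items_alt l1 l2 := by
  rw [alt_eq]
  unfold notcommon_items
  dsimp only
  have hfold : ∀ (m a : List Int),
      m.foldl (fun acc x => if ¬ (acc.contains x) then acc ++ [x] else acc) a
        = PySem.Set.update a m := by
    intro m a
    rw [PySem.List.foldl_congr_mem m
      (fun acc x => if ¬ (acc.contains x) then acc ++ [x] else acc)
      (fun acc x => PySem.Set.add acc x) a (fun acc x _ => add_step acc x)]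
    rfl
  rw [PySem.List.foldl_ite_eq_foldl_filter, PySem.List.foldl_ite_eq_foldl_filter, hfold, hfold]
  rw [filter_set_update, filter_set_update]
  have hnil : (PySem.Set.empty : List Int).filter
      (fun k => ((if k ∈ l2 then PySem.Int.bor (if k ∈ l1 then (1:Int) else 0) 2
                  else if k ∈ l1 then (1:Int) else 0) != 3)) = [] := rfl
  rw [hnil]
  congr 1
  · congr 1
    apply List.filter_congr
    intro x hx
    by_cases h2 : x ∈ l2 <;> simp [h2, hx] <;> decide
  · apply List.filter_congr
    intro y hy
    by_cases h1 : y ∈ l1 <;> simp [h1, hy] <;> decide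

-- ===== VERDICT (by name: the statement is the Claim_ definition above) =====
theorem notcommon_items_spec : Claim_equal_notcommon_items := by
  intro list1 list2 _
  exact notcommon_items_eq_alt list1 list2
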